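-- pv_equiv track=rewrite | github.com/alancast/LeetCodeProblems | python/medium/873_longest_fib_subsequence.py | len_longest_fib_subsequence_brute_force
-- ===== SOURCE A (Python) =====
-- from typing import List
--
-- def len_longest_fib_subsequence_brute_force(arr: List[int]) -> int:
--     # Initialize hash map of all numbers in the arr
--     nums = set(arr)
--     longest_subsequence = 0
--     n = len(arr)
--
--     # Start sequence and see how long it can go
--     for i in range(n):
--         # Minor optimization if we know we can't beat this length
--         if longest_subsequence > (n - i):
--             break
--
--         temp_subsequence = 0
--         for j in range(i+1, n):
--             a = arr[i]
--             b = arr[j]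
--             target = a + b
--             temp_subsequence = 2
--
--             # See how long sequence can go
--             while target in nums:
--                 a = b
--                 b = target
--                 target = a + b
--                 temp_subsequence += 1
--
--             longest_subsequence = max(temp_subsequence, longest_subsequence)
--
--     if longest_subsequence >= 3:
--         return longest_subsequence
--     return 0
-- ===== SOURCE B (Python) =====
-- def len_longest_fib_subsequence_brute_force(arr):
--     nums = set(arr)
--     n = len(arr)
--     steps = {}  # (a, b) -> number of Fibonacci extensions of the pair inside nums
--     longest = 0
--     for i in range(n):
--         if longest > n - i:
--             break
--         for j in range(i + 1, n):
--             a = arr[i]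
--             b = arr[j]
--             path = []
--             # walk the chain until a known pair or a sum outside nums,
--             # then fill the memo backwards along the walked path
--             while (a, b) not in steps and a + b in nums:
--                 path.append((a, b))
--                 a, b = b, a + b
--             v = steps.get((a, b), 0)
--             for p in reversed(path):
--                 v += 1
--                 steps[p] = v
--             longest = max(2 + v, longest)
--     return longest if longest >= 3 else 0
-- ===== Notes on version B (the rewrite author's own statement) =====
-- stated objective: alternative
-- what changed: B replaces A's repeated whole-chain while-loop walks (one per pair, re-walking shared suffixes) by a memoized predecessor-chain walk: a dict maps each walked pair (a,b) to its number of Fibonacci extensions inside the set, filled back along each walked path, so every chain pair is resolved once; this trades a per-pair dict lookup (slower on chain-free random data) for amortized O(1) chain resolution on chain-heavy data.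
-- outside the precondition, e.g. on len_longest_fib_subsequence_brute_force([1, 2, 3, 5, 8, 13, 0, 0]): A returns 9, B returns 9
import Mathlib
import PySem

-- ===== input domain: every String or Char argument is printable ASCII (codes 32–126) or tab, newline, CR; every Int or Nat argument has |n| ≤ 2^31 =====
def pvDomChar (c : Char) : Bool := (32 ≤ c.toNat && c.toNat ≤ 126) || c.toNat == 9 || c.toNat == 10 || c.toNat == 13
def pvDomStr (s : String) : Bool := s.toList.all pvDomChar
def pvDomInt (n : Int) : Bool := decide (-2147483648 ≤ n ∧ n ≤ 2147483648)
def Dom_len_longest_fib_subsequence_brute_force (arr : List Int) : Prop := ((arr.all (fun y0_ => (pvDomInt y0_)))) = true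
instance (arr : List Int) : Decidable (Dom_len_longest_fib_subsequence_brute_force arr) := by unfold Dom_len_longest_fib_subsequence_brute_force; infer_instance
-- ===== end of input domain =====

-- B replaces A's repeated whole-chain while-loop walks by a memoized walk (dict pair -> chain
-- extensions, filled back along each walked path) so each pair's chain is computed once;
-- same results, no speed claim measured.

-- ===== PORT A =====
-- fuel guard for the 'while target in nums' loop: on inputs admitted by Pre_ the walk provably
-- stops within arr.length^2 steps, so the fuel is never exhausted there (see pvW_total below).
def pvFuel (arr : List Int) : Nat := arr.length * arr.length + 1

-- the 'while target in nums: a = b; b = target; target = a + b; temp += 1' loop of A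
def pvChainA (nums : PySem.Set Int) : Nat → Int → Int → Int → Int → Int
  | 0, _, _, _, temp => temp
  | fuel+1, _a, b, target, temp =>
      if PySem.Set.contains nums target then
        pvChainA nums fuel b target (b + target) (temp + 1)
      else temp

-- the outer 'for i in range(n)' loop with its early break
def pvOuterA (arr : List Int) (nums : PySem.Set Int) (n : Int) : List Int → Int → Int
  | [], longest => longest
  | i :: is, longest =>
      if longest > n - i then longest
      else
        let longest' := (PySem.List.pyRange (i+1) n 1).foldl (fun longest j =>
            let a := PySem.List.pyGetD arr i 0
            let b := PySem.List.pyGetD arr j 0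
            let target := a + b
            max (pvChainA nums (pvFuel arr) a b target 2) longest) longest
        pvOuterA arr nums n is longest'

def len_longest_fib_subsequence_brute_force (arr : List Int) : Int :=
  let nums := PySem.Set.ofList arr
  let n : Int := (arr.length : Int)
  let longest := pvOuterA arr nums n (PySem.List.pyRange 0 n 1) 0
  if longest ≥ 3 then longest else 0

-- ===== PORT B =====
-- the 'while (a, b) not in steps and a + b in nums' collecting loop of B (same fuel guard)
def pvWalkB (nums : PySem.Set Int) (steps : PySem.Dict (Int × Int) Int) :
    Nat → Int → Int → List (Int × Int) → Int × Int × List (Int × Int)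
  | 0, a, b, path => (a, b, path)
  | fuel+1, a, b, path =>
      if !(steps.contains (a, b)) && PySem.Set.contains nums (a + b) then
        pvWalkB nums steps fuel b (a + b) (path ++ [(a, b)])
      else (a, b, path)

-- loop body of B for one pair: walk, then fill the memo backwards along the path
def pvChainB (nums : PySem.Set Int) (fuel : Nat) (a b : Int)
    (steps : PySem.Dict (Int × Int) Int) : Int × PySem.Dict (Int × Int) Int :=
  let w := pvWalkB nums steps fuel a b []
  let v := steps.getD (w.1, w.2.1) 0
  w.2.2.reverse.foldl (fun vs p => (vs.1 + 1, vs.2.insert p (vs.1 + 1))) (v, steps)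

def pvOuterB (arr : List Int) (nums : PySem.Set Int) (n : Int) :
    List Int → Int × PySem.Dict (Int × Int) Int → Int × PySem.Dict (Int × Int) Int
  | [], st => st
  | i :: is, st =>
      if st.1 > n - i then st
      else
        let st' := (PySem.List.pyRange (i+1) n 1).foldl (fun st j =>
            let a := PySem.List.pyGetD arr i 0
            let b := PySem.List.pyGetD arr j 0
            let r := pvChainB nums (pvFuel arr) a b st.2
            (max (2 + r.1) st.1, r.2)) st
        pvOuterB arr nums n is st'

def len_longest_fib_subsequence_brute_force_alt (arr : List Int) : Int :=
  let nums := PySem.Set.ofList arr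
  let n : Int := (arr.length : Int)
  let longest := (pvOuterB arr nums n (PySem.List.pyRange 0 n 1) (0, PySem.Dict.empty)).1
  if longest ≥ 3 then longest else 0

-- ===== PRECONDITION & SPEC =====
-- Pre_ excludes arrays containing the value 0 twice: on those the greedy chain from the pair
-- (0, 0) cycles, so A's while loop (and B's) can run forever; on the inputs with two zeros
-- where the early break happens to fire first A still returns, and B returns the same value.
def Pre_len_longest_fib_subsequence_brute_force (arr : List Int) : Prop := arr.count 0 ≤ 1
instance (arr : List Int) : Decidable (Pre_len_longest_fib_subsequence_brute_force arr) := by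
  unfold Pre_len_longest_fib_subsequence_brute_force; infer_instance

def pvWitness_len_longest_fib_subsequence_brute_force : List Int := [1, 2, 3, 5]

def Spec_len_longest_fib_subsequence_brute_force (arr : List Int) (out : Int) : Prop :=
  out = len_longest_fib_subsequence_brute_force_alt arr
instance (arr : List Int) (out : Int) : Decidable (Spec_len_longest_fib_subsequence_brute_force arr out) := by
  unfold Spec_len_longest_fib_subsequence_brute_force; infer_instance

-- ===== CLAIM (what is proved, stated in full; the proofs are below) =====
def Claim_equal_len_longest_fib_subsequence_brute_force : Prop :=
  ∀ (arr : List Int), Dom_len_longest_fib_subsequence_brute_force arr →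
    Pre_len_longest_fib_subsequence_brute_force arr →
    Spec_len_longest_fib_subsequence_brute_force arr (len_longest_fib_subsequence_brute_force arr)

-- ===== LEMMAS AND PROOFS =====

-- the Fibonacci step on pairs, and the reference (fuelled) step counter
def pvStep (p : Int × Int) : Int × Int := (p.2, p.1 + p.2)

def pvW (nums : PySem.Set Int) : Nat → Int × Int → Option Nat
  | 0, p => if PySem.Set.contains nums (p.1 + p.2) then none else some 0
  | F+1, p =>
      if PySem.Set.contains nums (p.1 + p.2) then (pvW nums F (pvStep p)).map (· + 1)
      else some 0

-- a "good" start pair: both components are array values and the pair is not (0,0)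
def pvGood (arr : List Int) (p : Int × Int) : Prop :=
  p.1 ∈ arr ∧ p.2 ∈ arr ∧ p ≠ ((0 : Int), (0 : Int))

-- memo invariant of B: every stored value is the true fuelled step count of its key
def pvInv (arr : List Int) (steps : PySem.Dict (Int × Int) Int) : Prop :=
  ∀ p v, steps.get? p = some v →
    pvGood arr p ∧ ∃ w : Nat,
      pvW (PySem.Set.ofList arr) (arr.length * arr.length) p = some w ∧ v = (w : Int)

-- the list of pairs visited by a walk of k genuine steps from p
def pvChainList (p : Int × Int) : Nat → List (Int × Int)
  | 0 => []
  | k+1 => p :: pvChainList (pvStep p) k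

theorem pv_contains_ofList (arr : List Int) (x : Int) :
    PySem.Set.contains (PySem.Set.ofList arr) x = true ↔ x ∈ arr := by
  rw [PySem.Set.contains_iff, PySem.Set.mem_ofList]

theorem pvW_contains_false {S : PySem.Set Int} {p : Int × Int} (F : Nat)
    (h : PySem.Set.contains S (p.1 + p.2) = false) : pvW S F p = some 0 := by
  cases F <;> simp only [pvW, h, Bool.false_eq_true, if_false]

theorem pvW_mono {S : PySem.Set Int} : ∀ {F F' : Nat} {p : Int × Int} {v : Nat},
    F ≤ F' → pvW S F p = some v → pvW S F' p = some v := by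
  intro F
  induction F with
  | zero =>
    intro F' p v _ h
    by_cases hc : PySem.Set.contains S (p.1 + p.2) = true
    · simp only [pvW, hc, if_true] at h; cases h
    · have hc' := eq_false_of_ne_true hc
      rw [pvW_contains_false 0 hc'] at h
      rw [pvW_contains_false F' hc']
      exact h
  | succ F ih =>
    intro F' p v hle h
    by_cases hc : PySem.Set.contains S (p.1 + p.2) = true
    · simp only [pvW, hc, if_true, Option.map_eq_some_iff] at h
      obtain ⟨w, hw, hv⟩ := h
      obtain ⟨F'', rfl⟩ : ∃ F'', F' = F'' + 1 := ⟨F' - 1, by omega⟩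
      simp only [pvW, hc, if_true, Option.map_eq_some_iff]
      exact ⟨w, ih (by omega) hw, hv⟩
    · have hc' := eq_false_of_ne_true hc
      rw [pvW_contains_false _ hc'] at h
      rw [pvW_contains_false _ hc']
      exact h

theorem pvW_le {S : PySem.Set Int} : ∀ {F : Nat} {p : Int × Int} {v : Nat},
    pvW S F p = some v → v ≤ F := by
  intro F
  induction F with
  | zero =>
    intro p v h
    by_cases hc : PySem.Set.contains S (p.1 + p.2) = true
    · simp only [pvW, hc, if_true] at h; cases h
    · rw [pvW_contains_false 0 (eq_false_of_ne_true hc)] at h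
      cases h; omega
  | succ F ih =>
    intro p v h
    by_cases hc : PySem.Set.contains S (p.1 + p.2) = true
    · simp only [pvW, hc, if_true, Option.map_eq_some_iff] at h
      obtain ⟨w, hw, hv⟩ := h
      have := ih hw; omega
    · rw [pvW_contains_false _ (eq_false_of_ne_true hc)] at h
      cases h; omega

theorem pvW_unroll {S : PySem.Set Int} {F : Nat} {p : Int × Int} {v : Nat}
    (h : pvW S F p = some v) (hc : PySem.Set.contains S (p.1 + p.2) = true) :
    ∃ w, pvW S F (pvStep p) = some w ∧ v = w + 1 := by
  cases F with
  | zero => simp only [pvW, hc, if_true] at h; cases h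
  | succ F =>
    simp only [pvW, hc, if_true, Option.map_eq_some_iff] at h
    obtain ⟨w, hw, hv⟩ := h
    exact ⟨w, pvW_mono (Nat.le_succ F) hw, hv.symm⟩

theorem pvStep_good {arr : List Int} {p : Int × Int} (hg : pvGood arr p)
    (hc : PySem.Set.contains (PySem.Set.ofList arr) (p.1 + p.2) = true) :
    pvGood arr (pvStep p) := by
  obtain ⟨h1, h2, h3⟩ := hg
  refine ⟨h2, (pv_contains_ofList arr _).mp hc, ?_⟩
  intro h
  rw [pvStep, Prod.mk.injEq] at h
  exact h3 (Prod.ext_iff.mpr ⟨by omega, h.1⟩)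

theorem pvStep_inj : Function.Injective pvStep := by
  intro p q h
  rw [pvStep, pvStep, Prod.mk.injEq] at h
  exact Prod.ext_iff.mpr ⟨by omega, h.1⟩

-- a pair returning to itself under the Fibonacci step must be (0, 0)
theorem pvStep_periodic {p : Int × Int} {k : Nat} (hk : 1 ≤ k)
    (h : pvStep^[k] p = p) : p = ((0 : Int), (0 : Int)) := by
  set x : Nat → Int := fun m => (pvStep^[m] p).1 with hxdef
  have hx1 : ∀ m, (pvStep^[m] p).2 = x (m + 1) := by
    intro m
    simp only [hxdef]
    rw [Function.iterate_succ_apply']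
    rfl
  have hrec : ∀ m, x (m + 2) = x m + x (m + 1) := by
    intro m
    have e1 : x (m + 2) = (pvStep^[m + 1] p).2 := (hx1 (m + 1)).symm
    rw [e1, Function.iterate_succ_apply']
    show (pvStep^[m] p).1 + (pvStep^[m] p).2 = _
    rw [hx1 m]
  have hper : ∀ m, x (m + k) = x m := by
    intro m
    simp only [hxdef]
    rw [Function.iterate_add_apply, h]
  have hshift : ∀ f : Nat → Int, f k = f 0 →
      (∑ m ∈ Finset.range k, f (m + 1)) = ∑ m ∈ Finset.range k, f m := by
    intro f hf
    have h1 := Finset.sum_range_succ f k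
    have h2 := Finset.sum_range_succ' f k
    rw [h1] at h2
    linarith [h2, hf]
  have hg : (∑ m ∈ Finset.range k, x (m + 1) * x (m + 2))
      = ∑ m ∈ Finset.range k, x m * x (m + 1) := by
    have hfk : x k * x (k + 1) = x 0 * x 1 := by
      have e0 : x k = x 0 := by have := hper 0; simpa using this
      have e1 : x (k + 1) = x 1 := by have := hper 1; rw [Nat.add_comm 1 k] at this; exact this
      rw [e0, e1]
    exact hshift (fun m => x m * x (m + 1)) hfk
  have hsq : (∑ m ∈ Finset.range k, x (m + 1) * x (m + 1))
      = ∑ m ∈ Finset.range k, x m * x m := by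
    have hfk : x k * x k = x 0 * x 0 := by
      have e0 : x k = x 0 := by have := hper 0; simpa using this
      rw [e0]
    exact hshift (fun m => x m * x m) hfk
  have hsplit : (∑ m ∈ Finset.range k, x (m + 1) * x (m + 2))
      = (∑ m ∈ Finset.range k, x m * x (m + 1)) + ∑ m ∈ Finset.range k, x (m + 1) * x (m + 1) := by
    rw [← Finset.sum_add_distrib]
    refine Finset.sum_congr rfl (fun m _ => ?_)
    rw [hrec m]; ring
  have hzero : (∑ m ∈ Finset.range k, x m * x m) = 0 := by linarith [hg, hsq, hsplit]
  have hnn : ∀ m ∈ Finset.range k, 0 ≤ x m * x m := fun m _ => mul_self_nonneg _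
  have hall := (Finset.sum_eq_zero_iff_of_nonneg hnn).mp hzero
  have h0 : x 0 = 0 := mul_self_eq_zero.mp (hall 0 (Finset.mem_range.mpr hk))
  have h1' : x 1 = 0 := by
    rcases Nat.lt_or_ge 1 k with hlt | hge
    · exact mul_self_eq_zero.mp (hall 1 (Finset.mem_range.mpr hlt))
    · have hk1 : k = 1 := by omega
      have := hper 0
      rw [hk1] at this
      simpa [h0] using this
  have hp1 : p.1 = 0 := by simpa [hxdef] using h0
  have hp2 : p.2 = 0 := by
    have := hx1 0
    simp only [Function.iterate_zero_apply] at this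
    rw [this, h1']
  exact Prod.ext_iff.mpr ⟨hp1, hp2⟩

theorem pvW_none_sums {S : PySem.Set Int} : ∀ {F : Nat} {p : Int × Int},
    pvW S F p = none → ∀ k ≤ F,
      PySem.Set.contains S ((pvStep^[k] p).1 + (pvStep^[k] p).2) = true := by
  intro F
  induction F with
  | zero =>
    intro p h k hk
    by_cases hc : PySem.Set.contains S (p.1 + p.2) = true
    · interval_cases k
      simpa using hc
    · rw [pvW_contains_false 0 (eq_false_of_ne_true hc)] at h; cases h
  | succ F ih =>
    intro p h k hk
    by_cases hc : PySem.Set.contains S (p.1 + p.2) = true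
    · cases k with
      | zero => simpa using hc
      | succ k' =>
        have h' : pvW S F (pvStep p) = none := by
          simp only [pvW, hc, if_true, Option.map_eq_none_iff] at h
          exact h
        have := ih h' k' (by omega)
        rw [Function.iterate_succ_apply]
        exact this
    · rw [pvW_contains_false _ (eq_false_of_ne_true hc)] at h; cases h

-- under Pre_ every queried walk stops within arr.length^2 steps
theorem pvW_total {arr : List Int} {p : Int × Int} (hg : pvGood arr p) :
    ∃ v, pvW (PySem.Set.ofList arr) (arr.length * arr.length) p = some v := by
  cases hw : pvW (PySem.Set.ofList arr) (arr.length * arr.length) p with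
  | some v => exact ⟨v, rfl⟩
  | none =>
    exfalso
    have hsums := pvW_none_sums hw
    have hcomp : ∀ k ≤ arr.length * arr.length + 1,
        (pvStep^[k] p).1 ∈ arr ∧ (pvStep^[k] p).2 ∈ arr := by
      intro k
      induction k with
      | zero =>
        intro _
        simpa using ⟨hg.1, hg.2.1⟩
      | succ k ih =>
        intro hk
        have h1 := (ih (by omega)).2
        have h2 : (pvStep^[k] p).1 + (pvStep^[k] p).2 ∈ arr :=
          (pv_contains_ofList arr _).mp (hsums k (by omega))
        rw [Function.iterate_succ_apply']
        exact ⟨h1, h2⟩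
    have hmaps : ∀ k ∈ Finset.range (arr.length * arr.length + 1),
        pvStep^[k] p ∈ arr.toFinset ×ˢ arr.toFinset := by
      intro k hk
      rw [Finset.mem_product, List.mem_toFinset, List.mem_toFinset]
      have := Finset.mem_range.mp hk
      exact hcomp k (by omega)
    have hcard : (arr.toFinset ×ˢ arr.toFinset).card
        < (Finset.range (arr.length * arr.length + 1)).card := by
      rw [Finset.card_product, Finset.card_range]
      have hle := arr.toFinset_card_le
      have := Nat.mul_le_mul hle hle
      omega
    obtain ⟨i, hi, j, hj, hne, heq⟩ :=
      Finset.exists_ne_map_eq_of_card_lt_of_maps_to hcard hmaps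
    have key : ∀ i j : Nat, i < j → pvStep^[i] p = pvStep^[j] p → False := by
      intro i j hij he
      have hadd : pvStep^[j] p = pvStep^[i] (pvStep^[j - i] p) := by
        rw [← Function.iterate_add_apply]
        congr 1
        omega
      have hpp : p = pvStep^[j - i] p := (pvStep_inj.iterate i) (by rw [← hadd]; exact he)
      exact hg.2.2 (pvStep_periodic (by omega) hpp.symm)
    rcases Nat.lt_or_ge i j with hij | hij
    · exact key i j hij heq
    · exact key j i (by omega) heq.symm

theorem pvChainA_eq {S : PySem.Set Int} : ∀ {F : Nat} {a b : Int} {v : Nat} (t : Int),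
    pvW S F (a, b) = some v → pvChainA S F a b (a + b) t = t + v := by
  intro F
  induction F with
  | zero =>
    intro a b v t h
    by_cases hc : PySem.Set.contains S (a + b) = true
    · simp only [pvW, hc, if_true] at h; cases h
    · rw [pvW_contains_false 0 (eq_false_of_ne_true hc)] at h
      cases h
      simp [pvChainA]
  | succ F ih =>
    intro a b v t h
    by_cases hc : PySem.Set.contains S (a + b) = true
    · have h' : pvW S (F + 1) (a, b) = some v := h
      simp only [pvW, hc, if_true, Option.map_eq_some_iff] at h'
      obtain ⟨w, hw, hv⟩ := h'
      show (if PySem.Set.contains S (a + b) = true then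
          pvChainA S F b (a + b) (b + (a + b)) (t + 1) else t) = t + v
      rw [if_pos hc]
      have := ih (a := b) (b := a + b) (t := t + 1) hw
      rw [this]
      omega
    · rw [pvW_contains_false _ (eq_false_of_ne_true hc)] at h
      cases h
      show (if PySem.Set.contains S (a + b) = true then
          pvChainA S F b (a + b) (b + (a + b)) (t + 1) else t) = t + 0
      rw [if_neg hc]
      omega

theorem pvInv_insert {arr : List Int} {steps : PySem.Dict (Int × Int) Int}
    {q : Int × Int} {w : Nat} (hInv : pvInv arr steps) (hg : pvGood arr q)
    (hw : pvW (PySem.Set.ofList arr) (arr.length * arr.length) q = some w) :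
    pvInv arr (steps.insert q (w : Int)) := by
  intro p v h
  rw [PySem.Dict.get?_insert] at h
  by_cases hpq : p = q
  · rw [if_pos hpq] at h
    cases h
    subst hpq
    exact ⟨hg, w, hw, rfl⟩
  · rw [if_neg hpq] at h
    exact hInv p v h

theorem pvWalk_spec {arr : List Int} {steps : PySem.Dict (Int × Int) Int}
    (hInv : pvInv arr steps) :
    ∀ (v : Nat) (a b : Int) (F : Nat) (path0 : List (Int × Int)),
    pvGood arr (a, b) →
    pvW (PySem.Set.ofList arr) (arr.length * arr.length) (a, b) = some v → v < F →
    ∃ k, k ≤ v ∧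
      pvWalkB (PySem.Set.ofList arr) steps F a b path0
        = ((pvStep^[k] (a, b)).1, (pvStep^[k] (a, b)).2, path0 ++ pvChainList (a, b) k)
      ∧ (∀ i < k, pvGood arr (pvStep^[i] (a, b)) ∧
            pvW (PySem.Set.ofList arr) (arr.length * arr.length) (pvStep^[i] (a, b)) = some (v - i))
      ∧ pvGood arr (pvStep^[k] (a, b))
      ∧ pvW (PySem.Set.ofList arr) (arr.length * arr.length) (pvStep^[k] (a, b)) = some (v - k)
      ∧ steps.getD (pvStep^[k] (a, b)) 0 = ((v - k : Nat) : Int) := by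
  intro v
  induction v with
  | zero =>
    intro a b F path0 hg hv hF
    obtain ⟨F', rfl⟩ : ∃ F', F = F' + 1 := ⟨F - 1, by omega⟩
    by_cases hm : steps.contains (a, b) = true
    · refine ⟨0, Nat.le_refl 0, ?_, by omega, by simpa using hg, by simpa using hv, ?_⟩
      · show (if !steps.contains (a, b) && PySem.Set.contains (PySem.Set.ofList arr) (a + b)
            then pvWalkB (PySem.Set.ofList arr) steps F' b (a + b) (path0 ++ [(a, b)])
            else (a, b, path0)) = _
        rw [hm]
        simp [pvChainList]
      · have hsome : (steps.get? (a, b)).isSome = true := by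
          rw [← PySem.Dict.contains_eq_isSome_get?]; exact hm
        obtain ⟨vI, hvI⟩ := Option.isSome_iff_exists.mp hsome
        obtain ⟨_, w, hw, rfl⟩ := hInv _ _ hvI
        have hw0 : w = 0 := by
          rw [hv] at hw
          exact (Option.some.inj hw).symm
        simp only [Function.iterate_zero_apply]
        rw [PySem.Dict.getD_of_get?_eq_some steps 0 hvI, hw0]
    · by_cases hc : PySem.Set.contains (PySem.Set.ofList arr) (a + b) = true
      · obtain ⟨w, _, hw1⟩ := pvW_unroll hv hc
        omega
      · have hm' := eq_false_of_ne_true hm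
        have hc' := eq_false_of_ne_true hc
        refine ⟨0, Nat.le_refl 0, ?_, by omega, by simpa using hg, by simpa using hv, ?_⟩
        · show (if !steps.contains (a, b) && PySem.Set.contains (PySem.Set.ofList arr) (a + b)
              then pvWalkB (PySem.Set.ofList arr) steps F' b (a + b) (path0 ++ [(a, b)])
              else (a, b, path0)) = _
          rw [hm', hc']
          simp [pvChainList]
        · simp only [Function.iterate_zero_apply]
          rw [PySem.Dict.getD_of_not_contains steps 0 hm']
          rfl
  | succ w ih =>
    intro a b F path0 hg hv hF
    obtain ⟨F', rfl⟩ : ∃ F', F = F' + 1 := ⟨F - 1, by omega⟩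
    by_cases hm : steps.contains (a, b) = true
    · refine ⟨0, Nat.zero_le _, ?_, by omega, by simpa using hg, by simpa using hv, ?_⟩
      · show (if !steps.contains (a, b) && PySem.Set.contains (PySem.Set.ofList arr) (a + b)
            then pvWalkB (PySem.Set.ofList arr) steps F' b (a + b) (path0 ++ [(a, b)])
            else (a, b, path0)) = _
        rw [hm]
        simp [pvChainList]
      · have hsome : (steps.get? (a, b)).isSome = true := by
          rw [← PySem.Dict.contains_eq_isSome_get?]; exact hm
        obtain ⟨vI, hvI⟩ := Option.isSome_iff_exists.mp hsome
        obtain ⟨_, w', hw', rfl⟩ := hInv _ _ hvI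
        have hww : w' = w + 1 := by
          rw [hv] at hw'
          exact (Option.some.inj hw').symm
        simp only [Function.iterate_zero_apply]
        rw [PySem.Dict.getD_of_get?_eq_some steps 0 hvI, hww]
        simp
    · by_cases hc : PySem.Set.contains (PySem.Set.ofList arr) (a + b) = true
      · have hm' := eq_false_of_ne_true hm
        obtain ⟨w', hw', hww⟩ := pvW_unroll hv hc
        have hw'' : pvW (PySem.Set.ofList arr) (arr.length * arr.length) (pvStep (a, b))
            = some w := by
          rw [hw']; congr 1; omega
        have hgood' : pvGood arr (pvStep (a, b)) := pvStep_good hg hc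
        have hstepeq : pvStep (a, b) = (b, a + b) := rfl
        obtain ⟨k, hk, hwalk, hall, hgend, hwend, hgetD⟩ :=
          ih b (a + b) F' (path0 ++ [(a, b)]) hgood' hw'' (by omega)
        refine ⟨k + 1, by omega, ?_, ?_, ?_, ?_, ?_⟩
        · show (if !steps.contains (a, b) && PySem.Set.contains (PySem.Set.ofList arr) (a + b)
              then pvWalkB (PySem.Set.ofList arr) steps F' b (a + b) (path0 ++ [(a, b)])
              else (a, b, path0)) = _
          rw [hm', hc]
          simp only [Bool.not_false, Bool.true_and, if_true]
          rw [hwalk, Function.iterate_succ_apply]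
          simp [pvChainList, pvStep]
        · intro i hi
          cases i with
          | zero =>
            simp only [Function.iterate_zero_apply, Nat.sub_zero]
            exact ⟨hg, hv⟩
          | succ i' =>
            have := hall i' (by omega)
            rw [Function.iterate_succ_apply, hstepeq]
            refine ⟨this.1, ?_⟩
            rw [this.2]
            congr 1
            omega
        · rw [Function.iterate_succ_apply, hstepeq]; exact hgend
        · rw [Function.iterate_succ_apply, hstepeq, hwend]
          congr 1
          omega
        · rw [Function.iterate_succ_apply, hstepeq]
          have he : w + 1 - (k + 1) = w - k := by omega
          rw [he]
          exact hgetD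
      · rw [pvW_contains_false _ (eq_false_of_ne_true hc)] at hv
        cases hv

theorem pvBackfill {arr : List Int} : ∀ (k : Nat) (p : Int × Int) (c : Nat)
    (steps : PySem.Dict (Int × Int) Int), pvInv arr steps →
    (∀ i < k, pvGood arr (pvStep^[i] p) ∧
        pvW (PySem.Set.ofList arr) (arr.length * arr.length) (pvStep^[i] p) = some (c + (k - i))) →
    ((pvChainList p k).reverse.foldl
        (fun vs q => (vs.1 + 1, vs.2.insert q (vs.1 + 1))) (((c : Nat) : Int), steps)).1
      = ((c + k : Nat) : Int)
    ∧ pvInv arr ((pvChainList p k).reverse.foldl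
        (fun vs q => (vs.1 + 1, vs.2.insert q (vs.1 + 1))) (((c : Nat) : Int), steps)).2 := by
  intro k
  induction k with
  | zero =>
    intro p c steps hInv _
    refine ⟨by simp [pvChainList], ?_⟩
    simpa [pvChainList] using hInv
  | succ k ih =>
    intro p c steps hInv hq
    have hrev : (pvChainList p (k + 1)).reverse
        = (pvChainList (pvStep p) k).reverse ++ [p] := by
      simp [pvChainList]
    have hq' : ∀ i < k, pvGood arr (pvStep^[i] (pvStep p)) ∧
        pvW (PySem.Set.ofList arr) (arr.length * arr.length) (pvStep^[i] (pvStep p))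
          = some (c + (k - i)) := by
      intro i hi
      have := hq (i + 1) (by omega)
      rw [Function.iterate_succ_apply] at this
      refine ⟨this.1, ?_⟩
      rw [this.2]
      congr 1
      omega
    have h0 := ih (pvStep p) c steps hInv hq'
    have hq0 := hq 0 (by omega)
    simp only [Function.iterate_zero_apply, Nat.sub_zero] at hq0
    rw [hrev, List.foldl_append, List.foldl_cons, List.foldl_nil]
    constructor
    · show ((pvChainList (pvStep p) k).reverse.foldl
          (fun vs q => (vs.1 + 1, vs.2.insert q (vs.1 + 1))) (((c : Nat) : Int), steps)).1 + 1 = _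
      rw [h0.1]
      push_cast
      ring
    · show pvInv arr (_root_.Prod.snd (_, PySem.Dict.insert _ _ _))
      have hval : ((pvChainList (pvStep p) k).reverse.foldl
          (fun vs q => (vs.1 + 1, vs.2.insert q (vs.1 + 1))) (((c : Nat) : Int), steps)).1 + 1
          = ((c + (k + 1) : Nat) : Int) := by
        rw [h0.1]; push_cast; ring
      rw [hval]
      exact pvInv_insert h0.2 hq0.1 hq0.2

theorem pvChainB_eq {arr : List Int} {steps : PySem.Dict (Int × Int) Int}
    {a b : Int} {v : Nat} (hg : pvGood arr (a, b)) (hInv : pvInv arr steps)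
    (hv : pvW (PySem.Set.ofList arr) (arr.length * arr.length) (a, b) = some v) :
    (pvChainB (PySem.Set.ofList arr) (pvFuel arr) a b steps).1 = (v : Int)
    ∧ pvInv arr (pvChainB (PySem.Set.ofList arr) (pvFuel arr) a b steps).2 := by
  have hle := pvW_le hv
  have hvM : v < pvFuel arr := by unfold pvFuel; omega
  obtain ⟨k, hk, hwalk, hall, hgend, hwend, hgetD⟩ :=
    pvWalk_spec hInv v a b (pvFuel arr) [] hg hv hvM
  have hq : ∀ i < k, pvGood arr (pvStep^[i] (a, b)) ∧
      pvW (PySem.Set.ofList arr) (arr.length * arr.length) (pvStep^[i] (a, b))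
        = some ((v - k) + (k - i)) := by
    intro i hi
    have := hall i (by omega)
    refine ⟨this.1, ?_⟩
    rw [this.2]
    congr 1
    omega
  have hBF := pvBackfill k (a, b) (v - k) steps hInv hq
  have hCB : pvChainB (PySem.Set.ofList arr) (pvFuel arr) a b steps
      = (pvChainList (a, b) k).reverse.foldl
          (fun vs p => (vs.1 + 1, vs.2.insert p (vs.1 + 1)))
          (((v - k : Nat) : Int), steps) := by
    unfold pvChainB
    simp only [hwalk, List.nil_append, Prod.mk.eta]
    rw [hgetD]
  rw [hCB]
  refine ⟨?_, hBF.2⟩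
  rw [hBF.1]
  congr 1
  omega

theorem pv_two_zeros {arr : List Int} {i j : Nat} (hij : i < j) (hj : j < arr.length)
    (h1 : arr[i] = (0 : Int)) (h2 : arr[j] = (0 : Int)) : 2 ≤ arr.count 0 := by
  have e : arr.count 0 = (arr.take j).count 0 + (arr.drop j).count 0 := by
    conv_lhs => rw [← List.take_append_drop j arr]
    exact List.count_append ..
  have hi' : i < (arr.take j).length := by
    rw [List.length_take]
    omega
  have m1 : (0 : Int) ∈ arr.take j := by
    have hgt : (arr.take j)[i] = arr[i] := List.getElem_take
    have := List.getElem_mem hi'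
    rw [hgt, h1] at this
    exact this
  have m2 : (0 : Int) ∈ arr.drop j := by
    have hj0 : 0 < (arr.drop j).length := by
      rw [List.length_drop]
      omega
    have hgd : (arr.drop j)[0] = arr[j] := by
      simp [List.getElem_drop]
    have := List.getElem_mem hj0
    rw [hgd, h2] at this
    exact this
  have c1 : 0 < (arr.take j).count (0 : Int) := List.count_pos_iff.mpr m1
  have c2 : 0 < (arr.drop j).count (0 : Int) := List.count_pos_iff.mpr m2
  omega

theorem pvPairGood {arr : List Int} (hPre : arr.count 0 ≤ 1) {i j : Int}
    (h0 : 0 ≤ i) (hij : i < j) (hj : j < (arr.length : Int)) :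
    pvGood arr (PySem.List.pyGetD arr i 0, PySem.List.pyGetD arr j 0) := by
  have hi2 : i < (arr.length : Int) := lt_trans hij hj
  have h0j : 0 ≤ j := le_trans h0 (le_of_lt hij)
  have hiN : i.toNat < arr.length := by omega
  have hjN : j.toNat < arr.length := by omega
  have e1 : PySem.List.pyGetD arr i 0 = arr[i.toNat]'hiN :=
    PySem.List.pyGetD_eq_getElem arr 0 h0 hi2
  have e2 : PySem.List.pyGetD arr j 0 = arr[j.toNat]'hjN :=
    PySem.List.pyGetD_eq_getElem arr 0 h0j hj
  refine ⟨?_, ?_, ?_⟩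
  · rw [e1]; exact List.getElem_mem _
  · rw [e2]; exact List.getElem_mem _
  · intro h
    rw [Prod.mk.injEq] at h
    have := pv_two_zeros (i := i.toNat) (j := j.toNat) (by omega) (by omega)
      (by rw [← e1]; exact h.1) (by rw [← e2]; exact h.2)
    omega

theorem pvInner_eq {arr : List Int} (hPre : arr.count 0 ≤ 1) {i : Int}
    (h0 : 0 ≤ i) :
    ∀ (js : List Int), (∀ j ∈ js, i < j ∧ j < (arr.length : Int)) →
    ∀ (L : Int) (steps : PySem.Dict (Int × Int) Int), pvInv arr steps →
    (js.foldl (fun st j =>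
        (max (2 + (pvChainB (PySem.Set.ofList arr) (pvFuel arr) (PySem.List.pyGetD arr i 0)
            (PySem.List.pyGetD arr j 0) st.2).1) st.1,
         (pvChainB (PySem.Set.ofList arr) (pvFuel arr) (PySem.List.pyGetD arr i 0)
            (PySem.List.pyGetD arr j 0) st.2).2)) (L, steps)).1
      = js.foldl (fun longest j =>
        max (pvChainA (PySem.Set.ofList arr) (pvFuel arr) (PySem.List.pyGetD arr i 0)
          (PySem.List.pyGetD arr j 0)
          (PySem.List.pyGetD arr i 0 + PySem.List.pyGetD arr j 0) 2) longest) L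
    ∧ pvInv arr (js.foldl (fun st j =>
        (max (2 + (pvChainB (PySem.Set.ofList arr) (pvFuel arr) (PySem.List.pyGetD arr i 0)
            (PySem.List.pyGetD arr j 0) st.2).1) st.1,
         (pvChainB (PySem.Set.ofList arr) (pvFuel arr) (PySem.List.pyGetD arr i 0)
            (PySem.List.pyGetD arr j 0) st.2).2)) (L, steps)).2 := by
  intro js
  induction js with
  | nil =>
    intro _ L steps hInv
    exact ⟨rfl, hInv⟩
  | cons j js ih =>
    intro hmem L steps hInv
    have hj := hmem j List.mem_cons_self
    have hgood := pvPairGood hPre h0 hj.1 hj.2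
    obtain ⟨v, hv⟩ := pvW_total hgood
    have hvF : pvW (PySem.Set.ofList arr) (pvFuel arr)
        (PySem.List.pyGetD arr i 0, PySem.List.pyGetD arr j 0) = some v :=
      pvW_mono (by unfold pvFuel; omega) hv
    have hA := pvChainA_eq (S := PySem.Set.ofList arr) (t := 2) hvF
    have hB := pvChainB_eq hgood hInv hv
    simp only [List.foldl_cons]
    rw [hB.1, hA]
    exact ih (fun j hjm => hmem j (List.mem_cons_of_mem _ hjm)) _ _ hB.2

theorem pvOuter_eq {arr : List Int} (hPre : arr.count 0 ≤ 1) :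
    ∀ (is : List Int), (∀ i ∈ is, 0 ≤ i ∧ i < (arr.length : Int)) →
    ∀ (L : Int) (steps : PySem.Dict (Int × Int) Int), pvInv arr steps →
    (pvOuterB arr (PySem.Set.ofList arr) (arr.length : Int) is (L, steps)).1
      = pvOuterA arr (PySem.Set.ofList arr) (arr.length : Int) is L
    ∧ pvInv arr (pvOuterB arr (PySem.Set.ofList arr) (arr.length : Int) is (L, steps)).2 := by
  intro is
  induction is with
  | nil =>
    intro _ L steps hInv
    exact ⟨rfl, hInv⟩
  | cons i is ih =>
    intro hmem L steps hInv
    have hi := hmem i List.mem_cons_self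
    simp only [pvOuterA, pvOuterB]
    by_cases hbr : L > (arr.length : Int) - i
    · rw [if_pos hbr, if_pos hbr]
      exact ⟨rfl, hInv⟩
    · rw [if_neg hbr, if_neg hbr]
      have hjs : ∀ j ∈ PySem.List.pyRange (i + 1) (arr.length : Int) 1,
          i < j ∧ j < (arr.length : Int) := by
        intro j hjm
        rw [PySem.List.mem_pyRange_one] at hjm
        omega
      have hIn := pvInner_eq hPre hi.1
        (PySem.List.pyRange (i + 1) (arr.length : Int) 1) hjs L steps hInv
      have hpair : (PySem.List.pyRange (i + 1) (arr.length : Int) 1).foldl (fun st j =>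
            (max (2 + (pvChainB (PySem.Set.ofList arr) (pvFuel arr) (PySem.List.pyGetD arr i 0)
                (PySem.List.pyGetD arr j 0) st.2).1) st.1,
             (pvChainB (PySem.Set.ofList arr) (pvFuel arr) (PySem.List.pyGetD arr i 0)
                (PySem.List.pyGetD arr j 0) st.2).2)) (L, steps)
          = ((PySem.List.pyRange (i + 1) (arr.length : Int) 1).foldl (fun longest j =>
              max (pvChainA (PySem.Set.ofList arr) (pvFuel arr) (PySem.List.pyGetD arr i 0)
                (PySem.List.pyGetD arr j 0)
                (PySem.List.pyGetD arr i 0 + PySem.List.pyGetD arr j 0) 2) longest) L,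
             ((PySem.List.pyRange (i + 1) (arr.length : Int) 1).foldl (fun st j =>
              (max (2 + (pvChainB (PySem.Set.ofList arr) (pvFuel arr) (PySem.List.pyGetD arr i 0)
                  (PySem.List.pyGetD arr j 0) st.2).1) st.1,
               (pvChainB (PySem.Set.ofList arr) (pvFuel arr) (PySem.List.pyGetD arr i 0)
                  (PySem.List.pyGetD arr j 0) st.2).2)) (L, steps)).2) := by
        rw [← hIn.1]
      rw [hpair]
      exact ih (fun i' hi' => hmem i' (List.mem_cons_of_mem _ hi')) _ _ hIn.2

-- ===== VERDICT (by name: the statement is the Claim_ definition above) =====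
theorem len_longest_fib_subsequence_brute_force_spec : Claim_equal_len_longest_fib_subsequence_brute_force := by
  intro arr _hDom hPre
  unfold Spec_len_longest_fib_subsequence_brute_force
  unfold len_longest_fib_subsequence_brute_force len_longest_fib_subsequence_brute_force_alt
  have h := pvOuter_eq (arr := arr) hPre (PySem.List.pyRange 0 (arr.length : Int) 1)
    (fun i hi => by
      rw [PySem.List.mem_pyRange_one] at hi; exact hi)
    0 PySem.Dict.empty
    (by intro p v h; rw [PySem.Dict.get?_empty] at h; cases h)
  simp only [h.1]
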